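-- pv_equiv track=rewrite | github.com/dyf-2316/Comment_Sentiment_Analysis | PreTreatment/dataProcess.py | compressed_text
-- ===== SOURCE A (Python) =====
-- import operator
--
-- def judge_repeat(list1, list2):
--     """
--     比较两个列表是否相同
--     :param list1: (list)
--     :param list2: (list)
--     :return: (bool)
--     """
--     if len(list1) != len(list2):
--         return False
--     else:
--         return operator.eq(list1, list2)
--
-- def compressed_text(comment_list):
--     """
--     对文本列表进行机械压缩
--     :param comment_list: (list)
--     :return: (list)
--     """
--     L1 = []
--     L2 = []
--     compress_list = []
--     for letter in comment_list:
--         if len(L1) == 0: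
--             L1.append(letter)
--         else:
--             if L1[0] == letter:
--                 if len(L2) == 0:
--                     # 规则1 L2为空 将字符加入L2
--                     L2.append(letter)
--                 else:
--                     # L2不为空，触发压缩判断
--                     if judge_repeat(L1, L2):
--                         # 规则2 重复 删去L2 同时将字符加入L2
--                         L2.clear()
--                         L2.append(letter)
--                     else:
--                         # 规则3 不重复 两个列表内容放到压缩列表中 清空两个列表 将字符加入L1
--                         compress_list.extend(L1)
--                         compress_list.extend(L2)
--                         L1.clear()
--                         L2.clear()
--                         L1.append(letter)
--             else:
--                 if judge_repeat(L1, L2) and len(L2) >= 2: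
--                     # 规则4 字符不相同 直接触发 重复且大于1 L1加入压缩列表 L1L2都清空 将字符加入L1
--                     compress_list.extend(L1)
--                     L1.clear()
--                     L2.clear()
--                     L1.append(letter)
--                 else:
--                     if len(L2) == 0:
--                         # 规则5
--                         L1.append(letter)
--                     else:
--                         # 规则6
--                         L2.append(letter)
--     else:
--         # 规则7
--         if judge_repeat(L1, L2):
--             compress_list.extend(L1)
--         else:
--             compress_list.extend(L1)
--             compress_list.extend(L2)
--     L1.clear()
--     L2.clear()
--     return compress_list
-- ===== SOURCE B (Python) =====
-- def compressed_text(comment_list):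
--     """
--     Mechanical compression; same automaton states as the original but the
--     repeated list comparison is replaced by an incrementally maintained
--     prefix-equality flag, so each step is O(1).
--     """
--     L1, L2, ok, res = [], [], True, []
--     # ok is always: len(L2) <= len(L1) and L2 == L1[:len(L2)]
--     for ch in comment_list:
--         if not L1:
--             L1.append(ch)
--         elif L1[0] == ch:
--             if L2 and not (ok and len(L1) == len(L2)):
--                 res += L1 + L2
--                 L1, L2, ok = [ch], [], True
--             else:
--                 L2, ok = [ch], True
--         elif ok and len(L1) == len(L2) and len(L2) >= 2:
--             res += L1
--             L1, L2, ok = [ch], [], True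
--         elif not L2:
--             L1.append(ch)
--         else:
--             ok = ok and len(L2) < len(L1) and L1[len(L2)] == ch
--             L2.append(ch)
--     res += L1
--     if not (ok and len(L1) == len(L2)):
--         res += L2
--     return res
-- ===== Notes on version B (the rewrite author's own statement) =====
-- stated objective: alternative
-- what changed: The judge_repeat helper's list comparison is removed entirely: B maintains an incremental prefix-equality flag (ok) updated in O(1) per step, and merges A's rule-1/rule-2 branches, so no list-vs-list comparison ever happens.
import Mathlib
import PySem

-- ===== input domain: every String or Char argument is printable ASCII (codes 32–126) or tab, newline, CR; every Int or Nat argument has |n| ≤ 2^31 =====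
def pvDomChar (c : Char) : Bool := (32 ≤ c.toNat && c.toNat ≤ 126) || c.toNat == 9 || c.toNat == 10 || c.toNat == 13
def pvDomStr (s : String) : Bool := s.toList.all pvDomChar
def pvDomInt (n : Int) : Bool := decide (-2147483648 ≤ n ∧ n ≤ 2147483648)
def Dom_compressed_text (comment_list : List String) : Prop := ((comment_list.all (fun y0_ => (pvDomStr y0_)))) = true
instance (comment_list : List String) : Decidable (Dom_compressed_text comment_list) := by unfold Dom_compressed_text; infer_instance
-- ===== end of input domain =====

-- B replaces A's per-step judge_repeat list comparison by an incrementally maintained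
-- prefix-equality flag; equivalence of the return values is proved (A mutates nothing observable).

-- ===== PORT A =====
-- judge_repeat(list1, list2)
def judgeRepeat (list1 list2 : List String) : Bool :=
  if list1.length ≠ list2.length then false else list1 == list2

-- one iteration of A's for-loop; state = (L1, L2, compress_list)
def stepA (st : List String × List String × List String) (letter : String) :
    List String × List String × List String :=
  let (l1, l2, cp) := st
  if l1.length = 0 then (l1 ++ [letter], l2, cp)
  else if PySem.List.pyGet? l1 0 == some letter then
    if l2.length = 0 then (l1, l2 ++ [letter], cp)                     -- 规则1
    else if judgeRepeat l1 l2 then (l1, [letter], cp)                  -- 规则2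
    else ([letter], [], cp ++ l1 ++ l2)                                -- 规则3
  else if judgeRepeat l1 l2 && decide (l2.length ≥ 2) then
    ([letter], [], cp ++ l1)                                           -- 规则4
  else if l2.length = 0 then (l1 ++ [letter], l2, cp)                  -- 规则5
  else (l1, l2 ++ [letter], cp)                                        -- 规则6

def compressed_text (comment_list : List String) : List String :=
  let st := comment_list.foldl stepA ([], [], [])
  let (l1, l2, cp) := st
  if judgeRepeat l1 l2 then cp ++ l1 else cp ++ l1 ++ l2               -- 规则7

-- ===== PORT B =====
-- one iteration of B's for-loop; state = (L1, L2, ok, res)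
def stepB (st : List String × List String × Bool × List String) (ch : String) :
    List String × List String × Bool × List String :=
  let (l1, l2, ok, res) := st
  if l1.isEmpty then (l1 ++ [ch], l2, ok, res)
  else if PySem.List.pyGet? l1 0 == some ch then
    if !l2.isEmpty && !(ok && l1.length == l2.length) then
      ([ch], [], true, res ++ l1 ++ l2)
    else (l1, [ch], true, res)
  else if ok && l1.length == l2.length && decide (l2.length ≥ 2) then
    ([ch], [], true, res ++ l1)
  else if l2.isEmpty then (l1 ++ [ch], l2, ok, res)
  else (l1, l2 ++ [ch],
        ok && decide (l2.length < l1.length) && (PySem.List.pyGet? l1 (l2.length : Int) == some ch),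
        res)

def compressed_text_alt (comment_list : List String) : List String :=
  let st := comment_list.foldl stepB ([], [], true, [])
  let (l1, l2, ok, res) := st
  (res ++ l1) ++ (if !(ok && l1.length == l2.length) then l2 else [])

-- ===== PRECONDITION & SPEC =====
def Spec_compressed_text (comment_list : List String) (out : List String) : Prop := out = compressed_text_alt comment_list
instance (comment_list : List String) (out : List String) : Decidable (Spec_compressed_text comment_list out) := by unfold Spec_compressed_text; infer_instance

-- ===== CLAIM (what is proved, stated in full; the proofs are below) =====
def Claim_equal_compressed_text : Prop := ∀ (comment_list : List String), Dom_compressed_text comment_list → Spec_compressed_text comment_list (compressed_text comment_list)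

-- ===== LEMMAS AND PROOFS =====

-- the meaning of B's flag: L2 is a (length-bounded) prefix of L1
def okInv (l1 l2 : List String) : Bool :=
  decide (l2.length ≤ l1.length ∧ l2 = l1.take l2.length)

lemma judge_eq_okInv (l1 l2 : List String) :
    judgeRepeat l1 l2 = (okInv l1 l2 && l1.length == l2.length) := by
  simp only [judgeRepeat, okInv]
  by_cases h : l1.length = l2.length
  · rw [if_neg (by omega)]
    have hT : l1.take l2.length = l1 := by rw [← h]; exact List.take_length
    rw [Bool.eq_iff_iff]
    simp only [hT, beq_iff_eq, Bool.and_eq_true, decide_eq_true_eq]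
    constructor
    · rintro rfl; exact ⟨⟨le_refl _, rfl⟩, rfl⟩
    · rintro ⟨⟨_, h2⟩, _⟩; exact h2.symm
  · have hb : (l1.length == l2.length) = false := by simpa using h
    rw [if_pos h, hb, Bool.and_false]

lemma okInv_append (l1 l2 : List String) (ch : String) :
    okInv l1 (l2 ++ [ch])
      = (okInv l1 l2 && decide (l2.length < l1.length)
          && (PySem.List.pyGet? l1 (l2.length : Int) == some ch)) := by
  simp only [okInv, PySem.List.pyGet?_natCast, List.length_append, List.length_singleton]
  rw [Bool.eq_iff_iff]
  simp only [Bool.and_eq_true, decide_eq_true_eq, beq_iff_eq]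
  constructor
  · rintro ⟨hl, he⟩
    have hlt : l2.length < l1.length := by omega
    have hg : l1[l2.length]? = some l1[l2.length] := List.getElem?_eq_getElem hlt
    rw [List.take_add_one, hg] at he
    have h2 := List.append_inj' he (by simp)
    refine ⟨⟨⟨by omega, h2.1⟩, hlt⟩, ?_⟩
    rw [hg]
    simpa using h2.2.symm
  · rintro ⟨⟨⟨hl, he⟩, hlt⟩, hg⟩
    have hgg : l1[l2.length]? = some l1[l2.length] := List.getElem?_eq_getElem hlt
    rw [hgg, Option.some_inj] at hg
    refine ⟨by omega, ?_⟩
    rw [List.take_add_one, hgg]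
    simp [← he, hg]

lemma stepB_stepA (l1 l2 cp : List String) (ch : String) (hp : l1 = [] → l2 = []) :
    stepB (l1, l2, okInv l1 l2, cp) ch
      = (let (a, b, c) := stepA (l1, l2, cp) ch; (a, b, okInv a b, c)) := by
  cases l1 with
  | nil =>
    have h2 := hp rfl
    subst h2
    simp [stepA, stepB, okInv]
  | cons x t =>
    have hGet : PySem.List.pyGet? (x :: t) 0 = some x := by
      simp [PySem.List.pyGet?, PySem.List.pyIdx?]
    cases l2 with
    | nil =>
      simp only [stepA, stepB, hGet, List.isEmpty_cons, List.isEmpty_nil, judge_eq_okInv]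
      by_cases hx : x = ch
      · subst hx
        simp [okInv]
      · simp [okInv, hx]
    | cons y u =>
      simp only [stepA, stepB, hGet, List.isEmpty_cons, judge_eq_okInv]
      by_cases hx : x = ch
      · subst hx
        by_cases hj : (okInv (x :: t) (y :: u) && ((x :: t).length == (y :: u).length)) = true
        · simp only [hj]
          simp [okInv]
        · simp only [Bool.not_eq_true] at hj
          simp only [hj]
          simp [okInv]
      · have hxb : (some x == some ch) = false := by simp [hx]
        by_cases hj4 : (okInv (x :: t) (y :: u) && ((x :: t).length == (y :: u).length)
            && decide ((y :: u).length ≥ 2)) = true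
        · simp only [hxb, Bool.false_eq_true, if_false, hj4, if_true]
          simp [okInv]
        · simp only [Bool.not_eq_true] at hj4
          simp only [hxb, Bool.false_eq_true, if_false, hj4, Prod.mk.injEq]
          refine ⟨rfl, rfl, ?_, rfl⟩
          rw [if_neg (by simp : ¬(x :: t).length = 0), if_neg (by simp : ¬(y :: u).length = 0),
            okInv_append]

lemma stepA_fst_ne_nil (l1 l2 cp : List String) (ch : String) :
    (stepA (l1, l2, cp) ch).1 ≠ [] := by
  simp only [stepA]
  split_ifs with h1 h2 h3 h4 h5 h6 <;> simp_all

lemma foldl_stepB_stepA (cl : List String) (l1 l2 cp : List String) (hp : l1 = [] → l2 = []) :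
    cl.foldl stepB (l1, l2, okInv l1 l2, cp)
      = (let (a, b, c) := cl.foldl stepA (l1, l2, cp); (a, b, okInv a b, c)) := by
  induction cl generalizing l1 l2 cp with
  | nil => simp
  | cons x xs ih =>
    simp only [List.foldl_cons]
    have h := stepB_stepA l1 l2 cp x hp
    rcases he : stepA (l1, l2, cp) x with ⟨a, b, c⟩
    rw [he] at h
    simp only at h
    have hne : a ≠ [] := by
      have h0 := stepA_fst_ne_nil l1 l2 cp x
      rw [he] at h0
      simpa using h0
    rw [h, ih a b c (fun hn => absurd hn hne)]

-- ===== VERDICT (by name: the statement is the Claim_ definition above) =====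
theorem compressed_text_spec : Claim_equal_compressed_text := by
  intro cl _
  unfold Spec_compressed_text compressed_text compressed_text_alt
  have h0 : cl.foldl stepB ([], [], true, []) = cl.foldl stepB ([], [], okInv [] [], []) := by
    norm_num [okInv]
  rw [h0, foldl_stepB_stepA cl [] [] [] (fun _ => rfl)]
  rcases cl.foldl stepA ([], [], []) with ⟨a, b, c⟩
  simp only [judge_eq_okInv]
  by_cases hj : (okInv a b && (a.length == b.length)) = true
  · simp [hj]
  · simp only [Bool.not_eq_true] at hj
    simp [hj]
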